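-- pv_equiv track=rewrite | github.com/buhyun1/TIL | algorithm/dsaa-2022/n2_Search matched sum.py | search_matched_sum
-- ===== SOURCE A (Python) =====
-- def search_matched_sum(arr : list, target : int):
--   min_index = ()
--   for i in range(0,len(arr)):
--     for j in range(i+1,len(arr)):
--       sum = arr[i] + arr[j]
--       if sum == target:
--         min_index = (i,j)
--
--   return min_index
-- ===== SOURCE B (Python) =====
-- def search_matched_sum(arr : list, target : int):
--   last = {}
--   for idx, v in enumerate(arr):
--     last[v] = idx
--   for i in range(len(arr) - 1, -1, -1):
--     j = last.get(target - arr[i])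
--     if j is not None and j > i:
--       return (i, j)
--   return ()
-- ===== Notes on version B (the rewrite author's own statement) =====
-- stated objective: faster
-- what changed: Replaced the full O(n^2) double scan that overwrites the result with a hash map of each value's last index built in one pass, then a single descending scan over i that returns at the first (= largest) i whose complement's last occurrence lies after i.
import Mathlib
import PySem

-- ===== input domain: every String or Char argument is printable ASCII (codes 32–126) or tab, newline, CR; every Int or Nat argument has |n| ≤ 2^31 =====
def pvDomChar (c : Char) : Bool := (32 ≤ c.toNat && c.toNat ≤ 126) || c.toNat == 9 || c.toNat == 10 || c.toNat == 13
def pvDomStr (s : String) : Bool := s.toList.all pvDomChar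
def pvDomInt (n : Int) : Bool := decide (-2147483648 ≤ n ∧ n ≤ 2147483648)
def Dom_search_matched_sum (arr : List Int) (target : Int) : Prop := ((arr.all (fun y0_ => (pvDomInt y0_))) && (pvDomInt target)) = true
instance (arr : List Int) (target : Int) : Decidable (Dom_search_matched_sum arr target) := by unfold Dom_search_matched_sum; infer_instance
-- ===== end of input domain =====

-- ===== PORT A =====
-- Literal port of A: double loop over index pairs, overwriting min_index on every match.
-- arr[i]/arr[j] are in range on every iteration, so pyGetD with default 0 is exact.
def search_matched_sum (arr : List Int) (target : Int) : List Int :=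
  (PySem.List.pyRange 0 (arr.length : Int) 1).foldl (fun min_index i =>
    (PySem.List.pyRange (i + 1) (arr.length : Int) 1).foldl (fun min_index j =>
      let sum := PySem.List.pyGetD arr i 0 + PySem.List.pyGetD arr j 0
      if sum == target then [i, j] else min_index) min_index) []

-- ===== PORT B =====
-- Port of B: build dict value -> last index in one pass, then scan i descending,
-- early-return (modelled by the Option accumulator) at the first valid complement.
def search_matched_sum_alt (arr : List Int) (target : Int) : List Int :=
  let last : PySem.Dict Int Int :=
    (PySem.List.enumerate arr 0).foldl (fun d p => d.insert p.2 p.1) PySem.Dict.empty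
  let res : Option (Int × Int) :=
    (PySem.List.pyRange ((arr.length : Int) - 1) (-1) (-1)).foldl (fun acc i =>
      if acc.isSome then acc
      else
        match last.get? (target - PySem.List.pyGetD arr i 0) with
        | some j => if j > i then some (i, j) else none
        | none => none) none
  match res with
  | some (i, j) => [i, j]
  | none => []

-- ===== PRECONDITION & SPEC =====
def Spec_search_matched_sum (arr : List Int) (target : Int) (out : List Int) : Prop := out = search_matched_sum_alt arr target
instance (arr : List Int) (target : Int) (out : List Int) : Decidable (Spec_search_matched_sum arr target out) := by unfold Spec_search_matched_sum; infer_instance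

-- ===== CLAIM (what is proved, stated in full; the proofs are below) =====
def Claim_equal_search_matched_sum : Prop := ∀ (arr : List Int) (target : Int), Dom_search_matched_sum arr target → Spec_search_matched_sum arr target (search_matched_sum arr target)

-- ===== LEMMAS AND PROOFS =====

-- last element of a filtered ascending range (proof-side shorthand)
def Flast (a b : Int) (p : Int → Bool) : Option Int :=
  ((PySem.List.pyRange a b 1).filter p).getLast?

-- "last satisfying element wins" shape of a fold
theorem foldl_last_if {α β : Type} (l : List α) (p : α → Bool) (f : α → β) (a : β) :
    l.foldl (fun acc x => if p x then f x else acc) a =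
      (match (l.filter p).getLast? with | some x => f x | none => a) := by
  induction l generalizing a with
  | nil => rfl
  | cons x t ih =>
      simp only [List.foldl_cons, List.filter_cons]
      by_cases hx : p x
      · simp only [hx, ih]
        cases h : (t.filter p).getLast? <;> simp [List.getLast?_cons, h]
      · simp [hx, ih]

-- early-exit fold (Option accumulator) is findSome?
theorem foldl_none_findSome {α β : Type} (l : List α) (g : α → Option β) :
    l.foldl (fun acc x => if acc.isSome then acc else g x) none = l.findSome? g := by
  have hsome : ∀ (l : List α) (v : β),
      l.foldl (fun acc x => if acc.isSome then acc else g x) (some v) = some v := by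
    intro l v; induction l <;> simp [List.foldl_cons, *]
  induction l with
  | nil => rfl
  | cons x t ih =>
      simp only [List.foldl_cons, List.findSome?]
      cases h : g x
      · simpa using ih
      · simpa using hsome t _

theorem findSome?_eq_head_filter {α β : Type} (l : List α) (g : α → Option β) :
    l.findSome? g =
      (match (l.filter (fun x => (g x).isSome)).head? with
       | some x => g x | none => none) := by
  induction l with
  | nil => rfl
  | cons x t ih =>
      simp only [List.findSome?, List.filter_cons]
      cases h : g x <;> simp [h, ih]

-- getLast? of (pyRange a (b+1) 1).filter p peels the top element
theorem F_step (a b : Int) (p : Int → Bool) (h : a ≤ b) :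
    Flast a (b + 1) p = (if p b then some b else Flast a b p) := by
  unfold Flast
  rw [PySem.List.pyRange_one_succ_right h, List.filter_append]
  by_cases hb : p b
  · simp [hb]
  · simp [hb]

theorem F_some (a b : Int) (p : Int → Bool) (x : Int) :
    Flast a b p = some x ↔
      (a ≤ x ∧ x < b ∧ p x = true ∧ ∀ y, x < y → y < b → p y = false) := by
  rcases le_or_gt a b with hab | hab
  · induction b, hab using Int.le_induction with
    | base =>
        unfold Flast
        rw [PySem.List.pyRange_one_eq_nil le_rfl]
        simp; omega
    | succ b hb ih =>
        rw [F_step a b p hb]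
        by_cases hp : p b
        · simp only [if_pos hp]
          constructor
          · rintro h; cases h
            exact ⟨hb, by omega, hp, by intro y h1 h2; omega⟩
          · rintro ⟨h1, h2, h3, h4⟩
            have : x = b := by
              by_contra hne
              have hxb : x < b := by omega
              exact absurd (h4 b hxb (by omega)) (by simp [hp])
            simp [this]
        · simp only [if_neg hp, ih]
          constructor
          · rintro ⟨h1, h2, h3, h4⟩
            refine ⟨h1, by omega, h3, ?_⟩
            intro y hy hy'
            rcases lt_or_eq_of_le (Int.lt_add_one_iff.mp hy') with h5 | h5
            · exact h4 y hy h5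
            · subst h5; simpa using hp
          · rintro ⟨h1, h2, h3, h4⟩
            have hxb : x ≠ b := by rintro rfl; simp [h3] at hp
            exact ⟨h1, by omega, h3, fun y hy hy' => h4 y hy (by omega)⟩
  · unfold Flast
    rw [PySem.List.pyRange_one_eq_nil (by omega)]
    simp; omega

-- a fold of inserts keyed by f with the index as value reads back the LAST index with that key
theorem get?_foldl_insert_key (l : List Int) (f : Int → Int) (v : Int) :
    (l.foldl (fun d j => d.insert (f j) j) (PySem.Dict.empty : PySem.Dict Int Int)).get? v =
      (l.filter (fun j => f j == v)).getLast? := by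
  induction l using List.reverseRecOn with
  | nil => rfl
  | append_singleton t x ih =>
      rw [List.foldl_append, List.filter_append]
      simp only [List.foldl_cons, List.foldl_nil, List.filter_cons, List.filter_nil]
      rw [PySem.Dict.get?_insert]
      by_cases hx : f x == v
      · have hv : v = f x := (beq_iff_eq.mp hx).symm
        rw [if_pos hv, if_pos hx, List.getLast?_concat]
      · have hv : ¬ (v = f x) := by
          intro h; exact hx (by simp [h])
        rw [if_neg hv, ih]
        simp [hx]

-- the dict of last occurrences, characterised as the last index of v in arr
theorem lastd_get? (arr : List Int) (v : Int) :
    ((PySem.List.enumerate arr 0).foldl (fun d p => d.insert p.2 p.1)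
        (PySem.Dict.empty : PySem.Dict Int Int)).get? v =
      Flast 0 (arr.length : Int) (fun j => PySem.List.pyGetD arr j 0 == v) := by
  rw [PySem.List.enumerate_eq_map_pyRange (d := 0), List.foldl_map]
  exact get?_foldl_insert_key _ _ v

-- closed forms of the two ports
theorem search_matched_sum_eq (arr : List Int) (target : Int) :
    search_matched_sum arr target =
      (match Flast 0 (arr.length : Int) (fun i =>
          (Flast (i + 1) (arr.length : Int)
            (fun j => PySem.List.pyGetD arr i 0 + PySem.List.pyGetD arr j 0 == target)).isSome) with
       | some i => [i, (Flast (i + 1) (arr.length : Int)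
            (fun j => PySem.List.pyGetD arr i 0 + PySem.List.pyGetD arr j 0 == target)).getD 0]
       | none => []) := by
  unfold search_matched_sum
  have hstep : (fun (min_index : List Int) (i : Int) =>
      (PySem.List.pyRange (i + 1) (arr.length : Int) 1).foldl (fun min_index j =>
        let sum := PySem.List.pyGetD arr i 0 + PySem.List.pyGetD arr j 0
        if sum == target then [i, j] else min_index) min_index)
    = (fun (min_index : List Int) (i : Int) =>
        if (Flast (i + 1) (arr.length : Int)
            (fun j => PySem.List.pyGetD arr i 0 + PySem.List.pyGetD arr j 0 == target)).isSome
        then [i, (Flast (i + 1) (arr.length : Int)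
            (fun j => PySem.List.pyGetD arr i 0 + PySem.List.pyGetD arr j 0 == target)).getD 0]
        else min_index) := by
    funext mi i
    rw [show (fun (min_index : List Int) (j : Int) =>
        let sum := PySem.List.pyGetD arr i 0 + PySem.List.pyGetD arr j 0
        if sum == target then [i, j] else min_index)
      = (fun (min_index : List Int) (j : Int) =>
        if (fun j => PySem.List.pyGetD arr i 0 + PySem.List.pyGetD arr j 0 == target) j
        then (fun j => [i, j]) j else min_index) from rfl]
    rw [foldl_last_if]
    rw [show ((PySem.List.pyRange (i + 1) (arr.length : Int) 1).filter
        (fun j => PySem.List.pyGetD arr i 0 + PySem.List.pyGetD arr j 0 == target)).getLast?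
      = Flast (i + 1) (arr.length : Int)
        (fun j => PySem.List.pyGetD arr i 0 + PySem.List.pyGetD arr j 0 == target) from rfl]
    cases h : Flast (i + 1) (arr.length : Int)
        (fun j => PySem.List.pyGetD arr i 0 + PySem.List.pyGetD arr j 0 == target) with
    | none => simp
    | some j => simp
  rw [hstep, foldl_last_if]
  rw [show ((PySem.List.pyRange 0 (arr.length : Int) 1).filter (fun i =>
      (Flast (i + 1) (arr.length : Int)
        (fun j => PySem.List.pyGetD arr i 0 + PySem.List.pyGetD arr j 0 == target)).isSome)).getLast?
    = Flast 0 (arr.length : Int) (fun i =>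
      (Flast (i + 1) (arr.length : Int)
        (fun j => PySem.List.pyGetD arr i 0 + PySem.List.pyGetD arr j 0 == target)).isSome) from rfl]
  cases Flast 0 (arr.length : Int) (fun i =>
      (Flast (i + 1) (arr.length : Int)
        (fun j => PySem.List.pyGetD arr i 0 + PySem.List.pyGetD arr j 0 == target)).isSome) <;> rfl

theorem search_matched_sum_alt_eq (arr : List Int) (target : Int) :
    search_matched_sum_alt arr target =
      (match Flast 0 (arr.length : Int) (fun i =>
          (match Flast 0 (arr.length : Int)
              (fun j => PySem.List.pyGetD arr j 0 == target - PySem.List.pyGetD arr i 0) with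
           | some j => decide (j > i) | none => false)) with
       | some i =>
          (match Flast 0 (arr.length : Int)
              (fun j => PySem.List.pyGetD arr j 0 == target - PySem.List.pyGetD arr i 0) with
           | some j => [i, j] | none => [])
       | none => []) := by
  unfold search_matched_sum_alt
  simp only [lastd_get?]
  rw [show ((PySem.List.pyRange ((arr.length : Int) - 1) (-1) (-1)).foldl (fun acc i =>
      if acc.isSome then acc
      else
        match Flast 0 (arr.length : Int)
            (fun j => PySem.List.pyGetD arr j 0 == target - PySem.List.pyGetD arr i 0) with
        | some j => if j > i then some (i, j) else none
        | none => none) none)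
    = ((PySem.List.pyRange ((arr.length : Int) - 1) (-1) (-1)).findSome? (fun i =>
        match Flast 0 (arr.length : Int)
            (fun j => PySem.List.pyGetD arr j 0 == target - PySem.List.pyGetD arr i 0) with
        | some j => if j > i then some (i, j) else none
        | none => none))
    by exact foldl_none_findSome _ (fun i =>
        match Flast 0 (arr.length : Int)
            (fun j => PySem.List.pyGetD arr j 0 == target - PySem.List.pyGetD arr i 0) with
        | some j => if j > i then some (i, j) else none
        | none => none)]
  have hrev : PySem.List.pyRange ((arr.length : Int) - 1) (-1) (-1)
      = (PySem.List.pyRange 0 (arr.length : Int) 1).reverse := by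
    rw [PySem.List.pyRange_neg_one_eq_reverse]
    norm_num
  rw [hrev, findSome?_eq_head_filter, List.filter_reverse, List.head?_reverse]
  set g := fun i => (match Flast 0 (arr.length : Int)
      (fun j => PySem.List.pyGetD arr j 0 == target - PySem.List.pyGetD arr i 0) with
    | some j => if j > i then some (i, j) else none
    | none => (none : Option (Int × Int))) with hg
  have hpred : (fun i => (g i).isSome)
      = (fun i => (match Flast 0 (arr.length : Int)
          (fun j => PySem.List.pyGetD arr j 0 == target - PySem.List.pyGetD arr i 0) with
        | some j => decide (j > i) | none => false)) := by
    funext i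
    cases h : Flast 0 (arr.length : Int)
        (fun j => PySem.List.pyGetD arr j 0 == target - PySem.List.pyGetD arr i 0) with
    | none => simp [hg, h]
    | some j => by_cases hji : j > i <;> simp [hg, h, hji]
  rw [show ((PySem.List.pyRange 0 (arr.length : Int) 1).filter fun i => (g i).isSome).getLast?
      = Flast 0 (arr.length : Int) (fun i => (g i).isSome) from rfl]
  rw [show (fun i => (g i).isSome)
      = (fun i => (match Flast 0 (arr.length : Int)
          (fun j => PySem.List.pyGetD arr j 0 == target - PySem.List.pyGetD arr i 0) with
        | some j => decide (j > i) | none => false)) from hpred] at *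
  cases hL : Flast 0 (arr.length : Int) (fun i =>
      (match Flast 0 (arr.length : Int)
          (fun j => PySem.List.pyGetD arr j 0 == target - PySem.List.pyGetD arr i 0) with
       | some j => decide (j > i) | none => false)) with
  | none => rfl
  | some i =>
      have hi : (match Flast 0 (arr.length : Int)
          (fun j => PySem.List.pyGetD arr j 0 == target - PySem.List.pyGetD arr i 0) with
        | some j => decide (j > i) | none => false) = true := by
        have := (F_some _ _ _ i).mp hL
        exact this.2.2.1
      cases hF : Flast 0 (arr.length : Int)
          (fun j => PySem.List.pyGetD arr j 0 == target - PySem.List.pyGetD arr i 0) with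
      | none => simp [hF] at hi
      | some j =>
          have hji : j > i := by simpa [hF] using hi
          simp [hg, hF, hji]

-- rewriting a Flast predicate pointwise on the range
theorem Flast_congr (a b : Int) (p q : Int → Bool) (h : ∀ x, a ≤ x → x < b → p x = q x) :
    Flast a b p = Flast a b q := by
  unfold Flast
  rw [List.filter_congr]
  intro x hx
  have := (PySem.List.mem_pyRange_one).mp hx
  exact h x this.1 this.2

-- B's complement test equals A's "match with a later j" test
theorem predicates_agree (arr : List Int) (target : Int) (i : Int) :
    (fun j => PySem.List.pyGetD arr j 0 == target - PySem.List.pyGetD arr i 0)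
      = (fun j => PySem.List.pyGetD arr i 0 + PySem.List.pyGetD arr j 0 == target) := by
  funext j
  rw [Bool.eq_iff_iff]
  simp only [beq_iff_eq]
  omega

theorem complement_agree (arr : List Int) (target : Int) (i j : Int) (h0i : 0 ≤ i) :
    Flast (i + 1) (arr.length : Int)
        (fun k => PySem.List.pyGetD arr i 0 + PySem.List.pyGetD arr k 0 == target) = some j
      ↔ (Flast 0 (arr.length : Int)
          (fun k => PySem.List.pyGetD arr i 0 + PySem.List.pyGetD arr k 0 == target) = some j
         ∧ i < j) := by
  rw [F_some, F_some]
  constructor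
  · rintro ⟨h1, h2, h3, h4⟩
    exact ⟨⟨by omega, h2, h3, h4⟩, by omega⟩
  · rintro ⟨⟨h1, h2, h3, h4⟩, h5⟩
    exact ⟨by omega, h2, h3, h4⟩

theorem isSome_eq_match (arr : List Int) (target : Int) (i : Int) (h0i : 0 ≤ i) :
    (Flast (i + 1) (arr.length : Int)
        (fun j => PySem.List.pyGetD arr i 0 + PySem.List.pyGetD arr j 0 == target)).isSome
      = (match Flast 0 (arr.length : Int)
            (fun j => PySem.List.pyGetD arr i 0 + PySem.List.pyGetD arr j 0 == target) with
         | some j => decide (j > i) | none => false) := by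
  cases h0 : Flast 0 (arr.length : Int)
      (fun j => PySem.List.pyGetD arr i 0 + PySem.List.pyGetD arr j 0 == target) with
  | none =>
      cases hI : Flast (i + 1) (arr.length : Int)
          (fun j => PySem.List.pyGetD arr i 0 + PySem.List.pyGetD arr j 0 == target) with
      | none => rfl
      | some j =>
          have := ((complement_agree arr target i j h0i).mp hI).1
          rw [this] at h0; cases h0
  | some j =>
      by_cases hj : j > i
      · have := (complement_agree arr target i j h0i).mpr ⟨h0, hj⟩
        rw [this]
        simp [hj]
      · cases hI : Flast (i + 1) (arr.length : Int)
            (fun j => PySem.List.pyGetD arr i 0 + PySem.List.pyGetD arr j 0 == target) with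
        | none => simp [hj]
        | some j' =>
            have h' := (complement_agree arr target i j' h0i).mp hI
            rw [h0] at h'
            have : j' = j := (Option.some.inj h'.1).symm
            exact absurd (this ▸ h'.2) hj

-- ===== VERDICT (by name: the statement is the Claim_ definition above) =====
theorem search_matched_sum_spec : Claim_equal_search_matched_sum := by
  intro arr target _
  unfold Spec_search_matched_sum
  rw [search_matched_sum_eq, search_matched_sum_alt_eq]
  simp only [predicates_agree]
  rw [Flast_congr 0 (arr.length : Int) _ _
      (fun i hi _ => isSome_eq_match arr target i hi)]
  cases hL : Flast 0 (arr.length : Int) (fun i =>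
      (match Flast 0 (arr.length : Int)
          (fun j => PySem.List.pyGetD arr i 0 + PySem.List.pyGetD arr j 0 == target) with
       | some j => decide (j > i) | none => false)) with
  | none => rfl
  | some i =>
      have hi0 := ((F_some _ _ _ i).mp hL).1
      have hi := ((F_some _ _ _ i).mp hL).2.2.1
      cases hF : Flast 0 (arr.length : Int)
          (fun j => PySem.List.pyGetD arr i 0 + PySem.List.pyGetD arr j 0 == target) with
      | none => rw [hF] at hi; cases hi
      | some j =>
          rw [hF] at hi
          have hj : j > i := of_decide_eq_true hi
          have hIJ := (complement_agree arr target i j hi0).mpr ⟨hF, hj⟩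
          simp [hIJ, hF]
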